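-- pv_equiv track=rewrite | github.com/Nowdoo/Naldoreidobac | main.py | detect_surf
-- ===== SOURCE A (Python) =====
-- def _normalize_seq_input(seq):
--     """
--     Aceita:
--      - lista de strings (PLAYER/BANKER/TIE)
--      - lista de dicts com key 'type'
--     Retorna lista de strings ('PLAYER'/'BANKER'/'TIE')
--     """
--     out = []
--     for s in seq:
--         if isinstance(s, dict):
--             t = s.get("type") or s.get("result") or s.get("raw")
--             if isinstance(t, str):
--                 t_up = t.strip().upper()
--                 if "PLAYER" in t_up:
--                     out.append("PLAYER")
--                 elif "BANKER" in t_up: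
--                     out.append("BANKER")
--                 elif "TIE" in t_up or "EMPATE" in t_up:
--                     out.append("TIE")
--             continue
--         if isinstance(s, str):
--             s_up = s.strip().upper()
--             if "PLAYER" in s_up:
--                 out.append("PLAYER")
--             elif "BANKER" in s_up:
--                 out.append("BANKER")
--             elif "TIE" in s_up or "EMPATE" in s_up:
--                 out.append("TIE")
--     return out
--
-- def detect_surf(seq, tolerance=4):
--     seq = _normalize_seq_input(seq)
--     seq = [s for s in seq if s in ("PLAYER", "BANKER")]
--     if len(seq) < tolerance:
--         return False, None, 0
--     last = seq[-1]
--     run = 1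
--     for s in reversed(seq[:-1]):
--         if s == last:
--             run += 1
--         else:
--             break
--     return run >= tolerance, last, run
-- ===== SOURCE B (Python) =====
-- def _normalize_seq_input(seq):
--     out = []
--     for s in seq:
--         if isinstance(s, dict):
--             t = s.get("type") or s.get("result") or s.get("raw")
--             if isinstance(t, str):
--                 t_up = t.strip().upper()
--                 if "PLAYER" in t_up:
--                     out.append("PLAYER")
--                 elif "BANKER" in t_up:
--                     out.append("BANKER")
--                 elif "TIE" in t_up or "EMPATE" in t_up:
--                     out.append("TIE")
--             continue
--         if isinstance(s, str):
--             s_up = s.strip().upper()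
--             if "PLAYER" in s_up:
--                 out.append("PLAYER")
--             elif "BANKER" in s_up:
--                 out.append("BANKER")
--             elif "TIE" in s_up or "EMPATE" in s_up:
--                 out.append("TIE")
--     return out
--
-- def detect_surf(seq, tolerance=4):
--     seq = _normalize_seq_input(seq)
--     seq = [s for s in seq if s in ("PLAYER", "BANKER")]
--     if not seq or len(seq) < tolerance:
--         return False, None, 0
--     # single forward pass: keep the current run's value and length
--     last, run = None, 0
--     for s in seq:
--         if s == last:
--             run += 1
--         else:
--             last, run = s, 1
--     return run >= tolerance, last, run
-- ===== Notes on version B (the rewrite author's own statement) =====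
-- stated objective: alternative
-- what changed: Replaces A's reverse scan with early break (slice, reversed, break) by a single forward pass that maintains the current run's value and length; B additionally guards the empty filtered list (where A raises IndexError, outside Pre_).
import Mathlib
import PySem

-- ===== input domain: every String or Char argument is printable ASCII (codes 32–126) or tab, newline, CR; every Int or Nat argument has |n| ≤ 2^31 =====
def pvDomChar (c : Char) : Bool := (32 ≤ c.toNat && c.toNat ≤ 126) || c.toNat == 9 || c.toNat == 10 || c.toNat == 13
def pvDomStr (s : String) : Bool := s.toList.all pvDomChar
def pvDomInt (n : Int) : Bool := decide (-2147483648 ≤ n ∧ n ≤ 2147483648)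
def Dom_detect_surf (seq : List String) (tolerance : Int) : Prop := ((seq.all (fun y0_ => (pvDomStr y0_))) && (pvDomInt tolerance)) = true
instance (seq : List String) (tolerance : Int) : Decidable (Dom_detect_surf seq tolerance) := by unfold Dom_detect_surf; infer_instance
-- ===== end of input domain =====

-- B replaces A's reverse scan with early break by a single forward pass keeping the
-- current run's value and length (objective: alternative; same O(n) cost).
-- Both Pythons share the identical `_normalize_seq_input` helper (string branch only,
-- since the Lean signature admits only lists of strings).

-- ===== PORT A =====
-- classification of one string element of `_normalize_seq_input` (the dict branch is
-- unreachable for `List String` inputs)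
def normClass (s : String) : Option String :=
  let u := PySem.Str.upper (PySem.Str.strip s)
  if PySem.Str.isIn "PLAYER" u then some "PLAYER"
  else if PySem.Str.isIn "BANKER" u then some "BANKER"
  else if PySem.Str.isIn "TIE" u || PySem.Str.isIn "EMPATE" u then some "TIE"
  else none

def normalize_seq_input (seq : List String) : List String :=
  seq.foldl (fun out s =>
    match normClass s with
    | some t => out ++ [t]
    | none => out) []

-- `for s in reversed(seq[:-1]): if s == last: run += 1 else: break`
def detect_surf_loop (last : String) : List String → Int → Int
  | [], run => run
  | s :: rest, run => if s == last then detect_surf_loop last rest (run + 1) else run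

def detect_surf (seq : List String) (tolerance : Int) : Bool × Option String × Int :=
  let sq := normalize_seq_input seq
  let sq := sq.filter (fun s => s == "PLAYER" || s == "BANKER")
  if (sq.length : Int) < tolerance then (false, none, 0)
  else
    match PySem.List.pyGet? sq (-1) with
    | none => (false, none, 0)  -- Python raises IndexError here; excluded by Pre_
    | some last =>
      let run := detect_surf_loop last ((PySem.List.slice sq none (some (-1))).reverse) 1
      (decide (tolerance ≤ run), some last, run)

-- ===== PORT B =====
def detect_surf_alt (seq : List String) (tolerance : Int) : Bool × Option String × Int :=
  let sq := normalize_seq_input seq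
  let sq := sq.filter (fun s => s == "PLAYER" || s == "BANKER")
  if sq.isEmpty || (sq.length : Int) < tolerance then (false, none, 0)
  else
    let p := sq.foldl (fun (st : Option String × Int) s =>
      if some s == st.1 then (st.1, st.2 + 1) else (some s, 1)) (none, (0 : Int))
    (decide (tolerance ≤ p.2), p.1, p.2)

-- ===== PRECONDITION & SPEC =====
-- Pre_ excludes exactly the inputs where A raises IndexError on seq[-1]:
-- tolerance ≤ 0 while no element normalizes to PLAYER or BANKER.
def Pre_detect_surf (seq : List String) (tolerance : Int) : Prop :=
  0 < tolerance ∨ (seq.any (fun s =>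
    let u := PySem.Str.upper (PySem.Str.strip s)
    PySem.Str.isIn "PLAYER" u || PySem.Str.isIn "BANKER" u)) = true
instance (seq : List String) (tolerance : Int) : Decidable (Pre_detect_surf seq tolerance) := by
  unfold Pre_detect_surf; infer_instance

def pvWitness_detect_surf : List String × Int := (["PLAYER", "BANKER"], 1)

def Spec_detect_surf (seq : List String) (tolerance : Int) (out : Bool × Option String × Int) : Prop := out = detect_surf_alt seq tolerance
instance (seq : List String) (tolerance : Int) (out : Bool × Option String × Int) : Decidable (Spec_detect_surf seq tolerance out) := by unfold Spec_detect_surf; infer_instance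

-- ===== CLAIM (what is proved, stated in full; the proofs are below) =====
def Claim_equal_detect_surf : Prop := ∀ (seq : List String) (tolerance : Int), Dom_detect_surf seq tolerance → Pre_detect_surf seq tolerance → Spec_detect_surf seq tolerance (detect_surf seq tolerance)

-- ===== LEMMAS AND PROOFS =====

def pvStep (st : Option String × Int) (s : String) : Option String × Int :=
  if some s == st.1 then (st.1, st.2 + 1) else (some s, 1)

lemma loop_eq (last : String) (l : List String) (run : Int) :
    detect_surf_loop last l run = run + ((l.takeWhile (fun s => s == last)).length : Int) := by
  induction l generalizing run with
  | nil => simp [detect_surf_loop]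
  | cons s rest ih =>
    by_cases h : (s == last) = true
    · simp [detect_surf_loop, h, ih]; omega
    · simp only [Bool.not_eq_true] at h
      simp [detect_surf_loop, h]

lemma trail_concat (l : List String) (a : String) :
    (l ++ [a]).foldl pvStep (none, (0 : Int)) =
      (some a, 1 + ((l.reverse.takeWhile (fun s => s == a)).length : Int)) := by
  induction l using List.reverseRecOn generalizing a with
  | nil => simp [pvStep]
  | append_singleton m b ih =>
    have step1 : ((m ++ [b]) ++ [a]).foldl pvStep (none, (0 : Int))
        = pvStep ((m ++ [b]).foldl pvStep (none, (0 : Int))) a := by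
      rw [List.foldl_append, List.foldl_cons, List.foldl_nil]
    rw [step1, ih b]
    by_cases h : a = b
    · subst h
      simp [pvStep, List.takeWhile_cons] <;> omega
    · have hb : (b == a) = false := beq_eq_false_iff_ne.mpr fun he => h he.symm
      have ha : ((some a == some b) = false) :=
        beq_eq_false_iff_ne.mpr (by simpa using h)
      simp [pvStep, ha, hb, List.takeWhile_cons]

lemma norm_foldl_acc (seq : List String) (acc : List String) :
    seq.foldl (fun out s => match normClass s with | some t => out ++ [t] | none => out) acc
      = acc ++ seq.foldl (fun out s => match normClass s with | some t => out ++ [t] | none => out) [] := by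
  induction seq generalizing acc with
  | nil => simp
  | cons s rest ih =>
    simp only [List.foldl_cons]
    cases h : normClass s with
    | none => simp only [h]; exact ih acc
    | some t =>
      simp only [h, List.nil_append]
      rw [ih (acc ++ [t]), ih [t]]
      simp

lemma normClass_pb (s : String) :
    (normClass s = some "PLAYER" ∨ normClass s = some "BANKER") ↔
    (PySem.Str.isIn "PLAYER" (PySem.Str.upper (PySem.Str.strip s))
      || PySem.Str.isIn "BANKER" (PySem.Str.upper (PySem.Str.strip s))) = true := by
  simp only [normClass]
  split_ifs with h1 h2 h3 <;> simp_all

lemma filtered_ne_nil_of_any (seq : List String)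
    (h : (seq.any (fun s =>
      let u := PySem.Str.upper (PySem.Str.strip s)
      PySem.Str.isIn "PLAYER" u || PySem.Str.isIn "BANKER" u)) = true) :
    (normalize_seq_input seq).filter (fun s => s == "PLAYER" || s == "BANKER") ≠ [] := by
  unfold normalize_seq_input
  induction seq with
  | nil => simp at h
  | cons s rest ih =>
    simp only [List.foldl_cons]
    rw [norm_foldl_acc]
    have h' : (PySem.Str.isIn "PLAYER" (PySem.Str.upper (PySem.Str.strip s)) = true
        ∨ PySem.Str.isIn "BANKER" (PySem.Str.upper (PySem.Str.strip s)) = true)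
        ∨ (rest.any (fun s =>
            let u := PySem.Str.upper (PySem.Str.strip s)
            PySem.Str.isIn "PLAYER" u || PySem.Str.isIn "BANKER" u)) = true := by
      simpa using h
    rcases h' with h' | h'
    · have hpb := (normClass_pb s).2 (by simpa using h')
      rcases hpb with hp | hp <;> simp [hp, List.filter_append]
    · intro hc
      cases hn : normClass s with
      | none =>
        rw [hn] at hc
        simp only [List.nil_append] at hc
        exact ih h' hc
      | some t =>
        rw [hn] at hc
        rw [List.filter_append] at hc
        exact ih h' (List.append_eq_nil_iff.mp hc).2

lemma detect_core (sq : List String) (tolerance : Int)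
    (hpre : 0 < tolerance ∨ sq ≠ []) :
    (if (sq.length : Int) < tolerance then ((false, none, 0) : Bool × Option String × Int)
     else
       match PySem.List.pyGet? sq (-1) with
       | none => (false, none, 0)
       | some last =>
         (decide (tolerance ≤ detect_surf_loop last ((PySem.List.slice sq none (some (-1))).reverse) 1),
           some last,
           detect_surf_loop last ((PySem.List.slice sq none (some (-1))).reverse) 1))
    = (if sq.isEmpty || decide ((sq.length : Int) < tolerance) then ((false, none, 0) : Bool × Option String × Int)
       else
         let p := sq.foldl pvStep (none, (0 : Int))
         (decide (tolerance ≤ p.2), p.1, p.2)) := by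
  by_cases hlt : (sq.length : Int) < tolerance
  · simp [hlt]
  · have hne : sq ≠ [] := by
      rcases hpre with hpos | hne
      · intro hnil
        rw [hnil] at hlt
        simp only [List.length_nil, Int.natCast_zero] at hlt
        omega
      · exact hne
    have hemp : sq.isEmpty = false := by simpa [List.isEmpty_iff] using hne
    have hget : PySem.List.pyGet? sq (-1) = some (sq.getLast hne) := by
      rw [PySem.List.pyGet?_neg_one, List.getLast?_eq_getLast_of_ne_nil hne]
    have hslice : PySem.List.slice sq none (some (-1)) = sq.dropLast :=
      PySem.List.slice_to_neg_one sq
    have hfold : sq.foldl pvStep (none, (0 : Int)) =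
        (some (sq.getLast hne),
          1 + ((sq.dropLast.reverse.takeWhile (fun s => s == sq.getLast hne)).length : Int)) := by
      conv_lhs => rw [← List.dropLast_concat_getLast hne]
      exact trail_concat _ _
    simp only [hget, hslice, hfold, loop_eq]
    simp [hlt, hemp]

-- ===== VERDICT =====
theorem detect_surf_spec : Claim_equal_detect_surf := by
  intro seq tolerance _ hpre
  unfold Spec_detect_surf
  have hpre' : 0 < tolerance ∨
      (normalize_seq_input seq).filter (fun s => s == "PLAYER" || s == "BANKER") ≠ [] := by
    rcases hpre with h | h
    · exact Or.inl h
    · exact Or.inr (filtered_ne_nil_of_any seq h)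
  exact detect_core _ tolerance hpre'
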